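-- pv_equiv track=rewrite | github.com/JR1QQ4/interviews | 笔试合集/美团篇.py | del_str
-- ===== SOURCE A (Python) =====
-- def del_str(input_str):
--     while True:
--         try:
--             result = ""
--             for i in range(len(input_str)):
--                 if len(input_str) == 1:
--                     result = input_str
--                     return result
--                 if i == 0:
--                     if input_str[i + 1] != input_str[i]:
--                         result += input_str[i]
--                 elif i == len(input_str) - 1:
--                     if input_str[i - 1] != input_str[i]:
--                         result += input_str[i]
--                 else:
--                     if input_str[i - 1] != input_str[i] and input_str[i + 1] != input_str[i]:
--                         result += input_str[i]
--             if len(result) == 0: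
--                 return "no"
--             else:
--                 return result
--         except:
--             raise
-- ===== SOURCE B (Python) =====
-- def del_str(input_str):
--     # Decompose the string into maximal runs of equal characters; keep only runs of length 1.
--     out = []
--     i, n = 0, len(input_str)
--     while i < n:
--         j = i + 1
--         while j < n and input_str[j] == input_str[i]:
--             j += 1
--         if j == i + 1:
--             out.append(input_str[i])
--         i = j
--     return "".join(out) if out else "no"
-- ===== Notes on version B (the rewrite author's own statement) =====
-- stated objective: alternative
-- what changed: B is a run-length decomposition: it walks maximal runs of equal characters with an inner run-consuming loop and keeps exactly the length-1 runs, instead of A's per-index pass testing each character against its two neighbors (A's length-1 special case and dead while/try wrapper disappear).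
import Mathlib
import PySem

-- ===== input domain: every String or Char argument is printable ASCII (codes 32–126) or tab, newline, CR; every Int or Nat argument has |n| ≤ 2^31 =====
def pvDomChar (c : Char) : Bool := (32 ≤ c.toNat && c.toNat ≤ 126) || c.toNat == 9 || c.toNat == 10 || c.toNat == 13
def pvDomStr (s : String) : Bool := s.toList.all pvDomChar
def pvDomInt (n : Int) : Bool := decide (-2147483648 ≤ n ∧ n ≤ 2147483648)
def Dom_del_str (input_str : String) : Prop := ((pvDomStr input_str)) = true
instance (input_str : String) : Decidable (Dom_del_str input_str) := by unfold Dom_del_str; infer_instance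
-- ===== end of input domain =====

-- B decomposes the string into maximal runs of equal characters and keeps the length-1
-- runs, instead of A's per-index three-way neighbor test (objective: alternative).

-- ===== PORT A =====
-- Literal port of A: the 'while True/try' wrapper always returns on the first pass and is
-- dropped; the 'len == 1' early return inside the loop fires at i = 0, hoisted to a guard.
def del_str (input_str : String) : String :=
  let cs := input_str.toList
  let n : Int := cs.length
  if n = 1 then input_str else
  let result := (PySem.List.pyRange 0 n 1).foldl (fun acc i =>
    if i = 0 then
      (if PySem.List.pyGetD cs (i + 1) ' ' ≠ PySem.List.pyGetD cs i ' ' then acc ++ [PySem.List.pyGetD cs i ' '] else acc)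
    else if i = n - 1 then
      (if PySem.List.pyGetD cs (i - 1) ' ' ≠ PySem.List.pyGetD cs i ' ' then acc ++ [PySem.List.pyGetD cs i ' '] else acc)
    else
      (if PySem.List.pyGetD cs (i - 1) ' ' ≠ PySem.List.pyGetD cs i ' ' ∧ PySem.List.pyGetD cs (i + 1) ' ' ≠ PySem.List.pyGetD cs i ' '
       then acc ++ [PySem.List.pyGetD cs i ' '] else acc)) []
  if result.length = 0 then "no" else String.ofList result

-- ===== PORT B =====
-- Source B's outer while walks one maximal run per iteration (the inner while = takeWhile /
-- dropWhile of characters equal to the run head) and keeps the run head iff the run has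
-- length 1 (j == i + 1, i.e. the takeWhile part is empty).
def delRuns (cs : List Char) : List Char :=
  match cs with
  | [] => []
  | c :: rest =>
      let same := rest.takeWhile (fun d => d = c)
      let rest' := rest.dropWhile (fun d => d = c)
      (if same.length = 0 then [c] else []) ++ delRuns rest'
termination_by cs.length
decreasing_by
  simpa using Nat.lt_succ_of_le (List.length_dropWhile_le _ _)

def del_str_alt (input_str : String) : String :=
  let out := delRuns input_str.toList
  if out = [] then "no" else String.ofList out

-- ===== PRECONDITION & SPEC =====
def Spec_del_str (input_str : String) (out : String) : Prop := out = del_str_alt input_str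
instance (input_str : String) (out : String) : Decidable (Spec_del_str input_str out) := by unfold Spec_del_str; infer_instance

-- ===== CLAIM (what is proved, stated in full; the proofs are below) =====
def Claim_equal_del_str : Prop := ∀ (input_str : String), Dom_del_str input_str → Spec_del_str input_str (del_str input_str)

-- ===== LEMMAS AND PROOFS =====

-- Common reference: one left-to-right pass carrying the previous character (none at the start);
-- a character is kept iff it differs from the previous one and from the next one (option
-- sentinels make the two boundary cases automatic).
def keepAux (prev : Option Char) : List Char → List Char
  | [] => []
  | c :: t => (if prev ≠ some c ∧ t.head? ≠ some c then [c] else []) ++ keepAux (some c) t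

-- keepAux only inspects prev through equality with the head
theorem keepAux_prev_congr (cs : List Char) (p1 p2 : Option Char)
    (h : ∀ c, cs.head? = some c → (p1 = some c ↔ p2 = some c)) :
    keepAux p1 cs = keepAux p2 cs := by
  cases cs with
  | nil => rfl
  | cons c t =>
    have h' := h c rfl
    simp only [keepAux]
    congr 1
    by_cases hc : p1 = some c
    · simp [hc, h'.mp hc]
    · have hc2 : ¬ p2 = some c := fun hh => hc (h'.mpr hh)
      simp [hc, hc2]

-- the head of a dropWhile does not satisfy the predicate
theorem head?_dropWhile_not (l : List Char) (p : Char → Bool) (x : Char)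
    (h : (l.dropWhile p).head? = some x) : p x = false := by
  induction l with
  | nil => simp [List.dropWhile] at h
  | cons a t ih =>
    rw [List.dropWhile_cons] at h
    split at h
    · exact ih h
    · simp_all

-- a whole run of k+1 copies of c followed by a list not starting with c
theorem keepAux_run (c : Char) (k : Nat) (rest' : List Char) (prev : Option Char)
    (hne : rest'.head? ≠ some c) :
    keepAux prev (List.replicate (k + 1) c ++ rest')
      = (if k = 0 ∧ prev ≠ some c then [c] else []) ++ keepAux (some c) rest' := by
  induction k generalizing prev with
  | zero =>
    have hr : List.replicate (0 + 1) c ++ rest' = c :: rest' := by simp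
    rw [hr]
    simp only [keepAux]
    congr 1
    by_cases hp : prev = some c <;> simp [hp, hne]
  | succ k ih =>
    have hrep : List.replicate (k + 2) c ++ rest' = c :: (List.replicate (k + 1) c ++ rest') := by
      simp [List.replicate_succ]
    rw [hrep]
    simp only [keepAux]
    have hhead : (List.replicate (k + 1) c ++ rest').head? = some c := by
      simp [List.replicate_succ]
    rw [ih (some c)]
    simp [hhead]

theorem delRuns_eq_keepAux (cs : List Char) : delRuns cs = keepAux none cs := by
  fun_induction delRuns cs with
  | case1 => rfl
  | case2 c rest same rest' ih =>
    have hsplit : rest = same ++ rest' := (List.takeWhile_append_dropWhile).symm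
    have hsame : same = List.replicate same.length c := by
      apply List.eq_replicate_of_mem
      intro x hx
      have := List.mem_takeWhile_imp hx
      simpa using this
    have hne : rest'.head? ≠ some c := by
      intro h
      have := head?_dropWhile_not rest (fun d => d = c) c h
      simp at this
    have hlist : c :: rest = List.replicate (same.length + 1) c ++ rest' := by
      rw [List.replicate_succ, List.cons_append, ← hsame, ← hsplit]
    rw [hlist, keepAux_run c same.length rest' none hne]
    rw [ih, keepAux_prev_congr rest' (some c) none (by intro x hx; simp [hx] at hne ⊢; intro hh; exact hne (by rw [hh]))]
    congr 1
    simp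

-- A's indexed pass, from position k to the end, is keepAux from position k
theorem foldA_suffix (cs : List Char) (hn : 2 ≤ cs.length) :
    ∀ (d k : Nat), k + d = cs.length → ∀ acc : List Char,
    (PySem.List.pyRange (k : Int) (cs.length : Int) 1).foldl (fun acc i =>
      if i = 0 then
        (if PySem.List.pyGetD cs (i + 1) ' ' ≠ PySem.List.pyGetD cs i ' ' then acc ++ [PySem.List.pyGetD cs i ' '] else acc)
      else if i = (cs.length : Int) - 1 then
        (if PySem.List.pyGetD cs (i - 1) ' ' ≠ PySem.List.pyGetD cs i ' ' then acc ++ [PySem.List.pyGetD cs i ' '] else acc)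
      else
        (if PySem.List.pyGetD cs (i - 1) ' ' ≠ PySem.List.pyGetD cs i ' ' ∧ PySem.List.pyGetD cs (i + 1) ' ' ≠ PySem.List.pyGetD cs i ' '
         then acc ++ [PySem.List.pyGetD cs i ' '] else acc)) acc
    = acc ++ keepAux (if k = 0 then none else cs[k-1]?) (cs.drop k) := by
  intro d
  induction d with
  | zero =>
    intro k hk acc
    have h1 : (PySem.List.pyRange (k : Int) (cs.length : Int) 1) = [] :=
      PySem.List.pyRange_one_eq_nil (by omega)
    have h2 : cs.drop k = [] := List.drop_eq_nil_of_le (by omega)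
    rw [h1, h2]
    simp [keepAux]
  | succ d ih =>
    intro k hk acc
    have hklt : k < cs.length := by omega
    rw [PySem.List.pyRange_one_cons (by exact_mod_cast hklt)]
    rw [List.foldl_cons]
    have hcast : ((k : Int) + 1) = (((k + 1 : Nat)) : Int) := by push_cast; ring
    rw [hcast, ih (k + 1) (by omega)]
    have hk1 : cs[k]? = some cs[k] := List.getElem?_eq_getElem hklt
    have hprev1 : (if k + 1 = 0 then none else cs[k + 1 - 1]?) = some cs[k] := by
      rw [if_neg (Nat.succ_ne_zero k)]
      simpa using hk1
    rw [hprev1]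
    have hdrop : cs.drop k = cs[k] :: cs.drop (k + 1) := List.drop_eq_getElem_cons hklt
    rw [hdrop]
    simp only [keepAux]
    have hget : PySem.List.pyGetD cs (k : Int) ' ' = cs[k] := by
      rw [PySem.List.pyGetD_natCast]
      exact List.getD_eq_getElem cs ' ' hklt
    have hheadnext : (cs.drop (k + 1)).head? = cs[k + 1]? := List.head?_drop
    rw [← List.append_assoc]
    congr 1
    -- now compare A's step on index k with keepAux's head element
    by_cases hk0 : k = 0
    · subst hk0
      have hkn : (0 : Nat) + 1 < cs.length := by omega
      have g1 : PySem.List.pyGetD cs 1 ' ' = cs[0 + 1] := by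
        rw [show ((1 : Int)) = (((0 + 1 : Nat)) : Int) by norm_num, PySem.List.pyGetD_natCast]
        exact List.getD_eq_getElem cs ' ' hkn
      have g0 : PySem.List.pyGetD cs 0 ' ' = cs[0] := by
        rw [show ((0 : Int)) = (((0 : Nat)) : Int) by norm_num, PySem.List.pyGetD_natCast]
        exact List.getD_eq_getElem cs ' ' (by omega)
      have hnext : cs[0 + 1]? = some cs[0 + 1] := List.getElem?_eq_getElem hkn
      by_cases hcond : cs[0 + 1] = cs[0] <;>
        simp [hcond, g1, g0, hheadnext, hnext]
    · have hkne0 : ((k : Int)) ≠ 0 := by exact_mod_cast hk0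
      rw [if_neg hkne0, if_neg hk0]
      have hgetprev : PySem.List.pyGetD cs ((k : Int) - 1) ' ' = cs[k - 1] := by
        rw [show ((k : Int) - 1) = (((k - 1 : Nat)) : Int) by omega, PySem.List.pyGetD_natCast]
        exact List.getD_eq_getElem cs ' ' (by omega)
      have hprevopt : cs[k - 1]? = some cs[k - 1] := List.getElem?_eq_getElem (by omega)
      by_cases hlast : k = cs.length - 1
      · have hlastInt : (k : Int) = (cs.length : Int) - 1 := by omega
        rw [if_pos hlastInt]
        have hdropnil : cs.drop (k + 1) = [] := List.drop_eq_nil_of_le (by omega)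
        simp only [hgetprev, hget, hdropnil, List.head?_nil]
        by_cases hcond : cs[k - 1] = cs[k] <;> simp [hcond, hprevopt, hget, hgetprev]
      · have hlastInt : (k : Int) ≠ (cs.length : Int) - 1 := by omega
        rw [if_neg hlastInt]
        have hkn : k + 1 < cs.length := by omega
        have hgetnext : PySem.List.pyGetD cs ((k : Int) + 1) ' ' = cs[k + 1] := by
          rw [show ((k : Int) + 1) = (((k + 1 : Nat)) : Int) by omega, PySem.List.pyGetD_natCast]
          exact List.getD_eq_getElem cs ' ' hkn
        have hnext : cs[k + 1]? = some cs[k + 1] := List.getElem?_eq_getElem hkn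
        simp only [hgetprev, hget, hgetnext, hheadnext, hnext]
        by_cases hc1 : cs[k - 1] = cs[k] <;> by_cases hc2 : cs[k + 1] = cs[k] <;>
          simp [hc1, hc2, hprevopt, hget, hgetprev, hgetnext]

theorem del_str_eq_alt (input_str : String) : del_str input_str = del_str_alt input_str := by
  unfold del_str del_str_alt
  set cs := input_str.toList with hcs
  by_cases h1 : (cs.length : Int) = 1
  · -- length-1 string: A returns it directly, B keeps its single run of length 1
    have hlen : cs.length = 1 := by omega
    obtain ⟨c, hc⟩ := List.length_eq_one_iff.mp hlen
    rw [if_pos h1]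
    rw [hc]
    simp only [delRuns, List.takeWhile_nil, List.dropWhile_nil, List.length_nil]
    simp only [if_pos rfl, delRuns, List.append_nil]
    rw [if_neg (by simp)]
    rw [← hc, hcs]
    exact (String.ofList_toList (s := input_str)).symm
  · rw [if_neg h1]
    by_cases h0 : cs.length = 0
    · have hnil : cs = [] := List.length_eq_zero_iff.mp h0
      rw [hnil]
      simp [PySem.List.pyRange_one_eq_nil, delRuns]
    · have hn : 2 ≤ cs.length := by omega
      have := foldA_suffix cs hn cs.length 0 (by omega) []
      simp only [Nat.cast_zero] at this
      rw [this]
      simp only [if_true, List.drop_zero, List.nil_append]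
      rw [← delRuns_eq_keepAux]
      by_cases he : delRuns cs = []
      · simp [he]
      · rw [if_neg he, if_neg (by simp [he])]

-- ===== VERDICT (by name: the statement is the Claim_ definition above) =====
theorem del_str_spec : Claim_equal_del_str := by
  intro s _
  unfold Spec_del_str
  exact del_str_eq_alt s
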